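-- pv_equiv track=rewrite | github.com/mariusschmiedt/watch_scraper | main.py | processDiameter
-- ===== SOURCE A (Python) =====
-- def processDiameter(state):
-- 	if state['diameter'] == '' and len(state['model'].split(' ')) > 1:
-- 		numbers = [sum(c.isdigit() for c in mod.strip()) for mod in state['model'].split(' ')]
-- 		if 2 in numbers:
-- 			diaIdx = numbers.index(2)
-- 			try:
-- 				state['diameter'] = str(int(state['model'].split(' ')[diaIdx]))
-- 			except:
-- 				pass
-- 	return state
-- ===== SOURCE B (Python) =====
-- def processDiameter(state):
--     if state['diameter'] == '' and ' ' in state['model']: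
--         tok = []
--         digits = 0
--         for ch in state['model'] + ' ':
--             if ch == ' ':
--                 if digits == 2:
--                     try:
--                         state['diameter'] = str(int(''.join(tok)))
--                     except ValueError:
--                         pass
--                     break
--                 tok = []
--                 digits = 0
--             else:
--                 tok.append(ch)
--                 if ch.isdigit():
--                     digits += 1
--     return state
-- ===== Notes on version B (the rewrite author's own statement) =====
-- stated objective: alternative
-- what changed: A splits the model into tokens and runs a staged pipeline (list of per-token digit counts, '2 in' test, .index(2), re-split and index to fetch the token); B never builds a token list: it is a character-level state machine that makes one pass over the model string, carrying the current token and its running digit count, and acts at the first token boundary where the count is 2.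
import Mathlib
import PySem

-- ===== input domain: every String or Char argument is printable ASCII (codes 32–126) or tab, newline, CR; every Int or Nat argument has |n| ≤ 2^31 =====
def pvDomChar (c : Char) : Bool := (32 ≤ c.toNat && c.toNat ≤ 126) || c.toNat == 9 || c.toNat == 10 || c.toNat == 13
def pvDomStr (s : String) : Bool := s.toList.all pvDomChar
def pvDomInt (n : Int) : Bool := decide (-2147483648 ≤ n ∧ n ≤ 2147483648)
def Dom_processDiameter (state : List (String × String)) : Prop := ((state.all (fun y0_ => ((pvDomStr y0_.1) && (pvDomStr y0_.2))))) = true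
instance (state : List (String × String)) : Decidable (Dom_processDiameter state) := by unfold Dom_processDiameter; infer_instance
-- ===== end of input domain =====

-- B replaces A's split-into-tokens pipeline (per-token digit-count list, 2-in-list test, .index(2), re-split
-- and index to fetch the token) by a character-level state machine: one pass over the model string itself,
-- carrying the current token and its running digit count, acting at the first token boundary where the count
-- is 2. Return value only — both Pythons mutate the dict in place identically.

-- ===== PORT A =====
-- state['model'].split(' ') (separator nonempty, so split? is some); strings are kept as List Char
def pvSplit (s : String) : List (List Char) := (PySem.Chars.split? s.toList [' ']).getD []

-- sum(c.isdigit() for c in mod.strip())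
def pvDigitSum (mod : List Char) : Int :=
  ((PySem.Chars.strip mod).map (fun c => if PySem.Chars.isdigit c then (1 : Int) else 0)).sum

def processDiameter (state : List (String × String)) : List (String × String) :=
  let d := PySem.Dict.mk state
  if d.getD "diameter" "" == "" && decide (1 < (pvSplit (d.getD "model" "")).length) then
    let numbers := (pvSplit (d.getD "model" "")).map pvDigitSum
    if numbers.contains 2 then
      match PySem.List.index? numbers 2 with
      | some diaIdx =>
        match PySem.List.pyGet? (pvSplit (d.getD "model" "")) (diaIdx : Int) with
        | some tok =>
          match PySem.Int.ofChars? tok with   -- int(<token str>) = PySem.Int.ofStr? = ofChars? on the char list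
          | some n => (d.insert "diameter" (PySem.Int.toStr n)).items
          | none => state          -- except: pass
        | none => state            -- except: pass (IndexError cannot happen)
      | none => state
    else state
  else state

-- ===== PORT B =====
-- Source B's for-loop over state['model'] + ' ': tok is the (reversed) accumulator list, digits the running count;
-- returns the current token at the first ' ' reached with digits == 2 (Source B then tries int and breaks),
-- none when the loop runs to the end.
def pvScan : List Char → List Char → Nat → Option (List Char)
  | [], _, _ => none
  | c :: cs, tok, digits =>
    if c == ' ' then
      if digits == 2 then some tok.reverse else pvScan cs [] 0
    else pvScan cs (c :: tok) (if PySem.Chars.isdigit c then digits + 1 else digits)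

def processDiameter_alt (state : List (String × String)) : List (String × String) :=
  let d := PySem.Dict.mk state
  if d.getD "diameter" "" == "" && PySem.Str.isIn " " (d.getD "model" "") then
    match pvScan ((d.getD "model" "").toList ++ [' ']) [] 0 with
    | some tok =>
      match PySem.Int.ofChars? tok with       -- int(''.join(tok))
      | some n => (d.insert "diameter" (PySem.Int.toStr n)).items
      | none => state                         -- except ValueError: pass
    | none => state
  else state

-- ===== PRECONDITION & SPEC =====
-- Pre_ excludes exactly the inputs on which A raises KeyError: 'diameter' missing, or
-- 'diameter' maps to '' and 'model' is missing (short-circuit: 'model' is only read then).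
def Pre_processDiameter (state : List (String × String)) : Prop :=
  (PySem.Dict.mk state).contains "diameter" = true ∧
  ((PySem.Dict.mk state).getD "diameter" "" = "" → (PySem.Dict.mk state).contains "model" = true)
instance (state : List (String × String)) : Decidable (Pre_processDiameter state) := by
  unfold Pre_processDiameter; infer_instance
def pvWitness_processDiameter : (List (String × String)) := [("diameter", ""), ("model", "abc 42 x")]

def Spec_processDiameter (state : List (String × String)) (out : List (String × String)) : Prop := out = processDiameter_alt state
instance (state : List (String × String)) (out : List (String × String)) : Decidable (Spec_processDiameter state out) := by unfold Spec_processDiameter; infer_instance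

-- ===== CLAIM (what is proved, stated in full; the proofs are below) =====
def Claim_equal_processDiameter : Prop := ∀ (state : List (String × String)), Dom_processDiameter state → Pre_processDiameter state → Spec_processDiameter state (processDiameter state)

-- ===== LEMMAS AND PROOFS =====

-- digit count of a char list
def dcount (g : List Char) : Nat := (g.filter PySem.Chars.isdigit).length

-- prepend to the head group (the head group of a split is still open on the left)
def withHead (pre : List Char) : List (List Char) → List (List Char)
  | [] => [pre]
  | g :: gs => (pre ++ g) :: gs

-- reference single-char split on ' '
def mySplit : List Char → List (List Char)
  | [] => [[]]
  | c :: rest => if c == ' ' then [] :: mySplit rest else withHead [c] (mySplit rest)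

-- first group with exactly two digits
def firstDia2 : List (List Char) → Option (List Char)
  | [] => none
  | g :: gs => if dcount g == 2 then some g else firstDia2 gs

lemma isdigit_false_of_isspace (c : Char) (h : PySem.Chars.isspace c = true) :
    PySem.Chars.isdigit c = false := by
  simp only [PySem.Chars.isspace, decide_eq_true_eq, Bool.or_eq_true, Bool.and_eq_true] at h
  simp only [PySem.Chars.isdigit, Bool.and_eq_false_iff, decide_eq_false_iff_not, Char.le_def,
    UInt32.le_iff_toNat_le]
  have h0 : ('0' : Char).val.toNat = 48 := rfl
  have h9 : ('9' : Char).val.toNat = 57 := rfl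
  have hc : c.toNat = c.val.toNat := rfl
  rw [hc] at h
  omega

lemma dcount_dropWhile (l : List Char) :
    dcount (l.dropWhile PySem.Chars.isspace) = dcount l := by
  induction l with
  | nil => rfl
  | cons c cs ih =>
    by_cases h : PySem.Chars.isspace c = true
    · have hnd := isdigit_false_of_isspace c h
      have hdw : (c :: cs).dropWhile PySem.Chars.isspace = cs.dropWhile PySem.Chars.isspace := by
        simp [List.dropWhile, h]
      rw [hdw, ih]
      simp [dcount, hnd]
    · simp [List.dropWhile, h]

lemma dcount_reverse (l : List Char) : dcount l.reverse = dcount l := by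
  simp [dcount]

lemma dcount_strip (g : List Char) : dcount (PySem.Chars.strip g) = dcount g := by
  simp only [PySem.Chars.strip, PySem.Chars.rstrip, PySem.Chars.lstrip]
  rw [dcount_reverse, dcount_dropWhile, dcount_reverse, dcount_dropWhile]

lemma sum_ite_eq_filter_length (l : List Char) :
    (l.map (fun c => if PySem.Chars.isdigit c then (1 : Int) else 0)).sum
      = ((l.filter PySem.Chars.isdigit).length : Int) := by
  induction l with
  | nil => simp
  | cons c cs ih =>
    by_cases h : PySem.Chars.isdigit c = true
    · simp [h, ih]; omega
    · simp [h, ih]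

lemma pvDigitSum_eq_dcount (g : List Char) : pvDigitSum g = (dcount g : Int) := by
  unfold pvDigitSum
  rw [sum_ite_eq_filter_length]
  have h := dcount_strip g
  unfold dcount at h
  rw [h]
  rfl

lemma mySplit_ne_nil (l : List Char) : mySplit l ≠ [] := by
  cases l with
  | nil => simp [mySplit]
  | cons c rest =>
    by_cases h : c == ' '
    · simp [mySplit, h]
    · simp only [mySplit, h, Bool.false_eq_true, if_false]
      cases mySplit rest <;> simp [withHead]

lemma withHead_withHead (a b : List Char) (gs : List (List Char)) :
    withHead a (withHead b gs) = withHead (a ++ b) gs := by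
  cases gs <;> simp [withHead]

lemma withHead_nil_mySplit (l : List Char) : withHead [] (mySplit l) = mySplit l := by
  cases h : mySplit l with
  | nil => exact absurd h (mySplit_ne_nil l)
  | cons g gs => simp [withHead]

lemma go_eq (fuel : Nat) : ∀ (l cur : List Char) (acc : List (List Char)), l.length < fuel →
    PySem.Chars.splitOn.go [' '] fuel l cur acc = acc.reverse ++ withHead cur.reverse (mySplit l) := by
  induction fuel with
  | zero => intro l cur acc h; omega
  | succ n ih =>
    intro l cur acc h
    cases l with
    | nil => simp [PySem.Chars.splitOn.go, mySplit, withHead]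
    | cons c rest =>
      by_cases hc : c = ' '
      · subst hc
        have : PySem.Chars.splitOn.go [' '] (n+1) (' ' :: rest) cur acc
            = PySem.Chars.splitOn.go [' '] n rest [] (cur.reverse :: acc) := by
          simp [PySem.Chars.splitOn.go, List.isPrefixOf]
        rw [this, ih rest [] (cur.reverse :: acc) (by simpa using Nat.lt_of_succ_lt_succ h)]
        simp only [List.reverse_nil]
        rw [withHead_nil_mySplit]
        simp [mySplit, withHead]
      · have : PySem.Chars.splitOn.go [' '] (n+1) (c :: rest) cur acc
            = PySem.Chars.splitOn.go [' '] n rest (c :: cur) acc := by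
          simp [PySem.Chars.splitOn.go, List.isPrefixOf, Ne.symm hc]
        rw [this, ih rest (c :: cur) acc (by simpa using Nat.lt_of_succ_lt_succ h)]
        simp [mySplit, hc, withHead_withHead]

lemma pvSplit_eq (s : String) : pvSplit s = mySplit s.toList := by
  unfold pvSplit
  rw [show PySem.Chars.split? s.toList [' '] = some (PySem.Chars.splitOn s.toList [' ']) from rfl]
  rw [show PySem.Chars.splitOn s.toList [' ']
      = PySem.Chars.splitOn.go [' '] (s.toList.length + 1) s.toList [] [] from rfl]
  rw [go_eq _ _ _ _ (by omega)]
  simp [withHead_nil_mySplit]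

lemma scan_eq : ∀ (l tok : List Char) (d : Nat), d = dcount tok →
    pvScan (l ++ [' ']) tok d = firstDia2 (withHead tok.reverse (mySplit l)) := by
  intro l
  induction l with
  | nil =>
    intro tok d hd
    subst hd
    simp only [List.nil_append, pvScan, mySplit, withHead, List.append_nil, firstDia2,
      dcount_reverse]
    cases h : dcount tok == 2 <;> simp
  | cons c rest ih =>
    intro tok d hd
    by_cases hc : c = ' '
    · subst hc
      simp only [List.cons_append, pvScan, beq_self_eq_true, if_true]
      have h2 : (d == 2) = (dcount tok.reverse == 2) := by rw [hd, dcount_reverse]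
      simp only [mySplit, beq_self_eq_true, if_true, withHead, List.append_nil]
      rw [firstDia2, ← h2]
      cases h : d == 2
      · simp only [Bool.false_eq_true, if_false]
        rw [ih [] 0 rfl]
        simp only [List.reverse_nil]
        rw [withHead_nil_mySplit]
      · simp
    · have hcb : (c == ' ') = false := by simp [hc]
      simp only [List.cons_append, pvScan, hcb, Bool.false_eq_true, if_false]
      rw [ih (c :: tok) _ (by
        subst hd
        cases h : PySem.Chars.isdigit c <;> simp [h, dcount])]
      simp only [mySplit, hcb, Bool.false_eq_true, if_false, withHead_withHead]
      rw [List.reverse_cons]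

lemma firstDia2_eq_index (groups : List (List Char)) :
    firstDia2 groups =
      (match PySem.List.index? (groups.map (fun g => (dcount g : Int))) 2 with
       | none => none
       | some i => groups[i]?) := by
  induction groups with
  | nil => simp [firstDia2, PySem.List.index?]
  | cons g gs ih =>
    by_cases h : (dcount g : Int) = 2
    · have h2 : (dcount g == 2) = true := by simp; omega
      simp only [List.map_cons, firstDia2, h2, if_true, ← h, PySem.List.index?_cons_self]
      simp
    · have h2 : (dcount g == 2) = false := by simp; omega
      rw [List.map_cons, PySem.List.index?_cons_of_ne _ h]
      simp only [firstDia2, h2, Bool.false_eq_true, if_false, ih]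
      cases PySem.List.index? (gs.map (fun g => (dcount g : Int))) 2 <;> simp

lemma contains_two_eq (groups : List (List Char)) :
    (groups.map (fun g => (dcount g : Int))).contains 2
      = (PySem.List.index? (groups.map (fun g => (dcount g : Int))) 2).isSome := by
  cases h : (PySem.List.index? (groups.map (fun g => (dcount g : Int))) 2).isSome with
  | true => simpa using (PySem.List.index?_isSome_iff _ _).mp h
  | false =>
    have : (2 : Int) ∉ groups.map (fun g => (dcount g : Int)) := by
      intro hm
      rw [(PySem.List.index?_isSome_iff _ _).mpr hm] at h
      simp at h
    simpa using this

lemma length_mySplit_gt_one_iff (l : List Char) : 1 < (mySplit l).length ↔ ' ' ∈ l := by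
  induction l with
  | nil => simp [mySplit]
  | cons c rest ih =>
    by_cases hc : c = ' '
    · subst hc
      have hne := mySplit_ne_nil rest
      have hmem : ' ' ∈ ' ' :: rest := by simp
      simp only [mySplit, beq_self_eq_true, if_true, hmem, iff_true, List.length_cons]
      cases h : mySplit rest with
      | nil => exact absurd h hne
      | cons g gs => simp only [List.length_cons]; omega
    · have hcb : (c == ' ') = false := by simp [hc]
      simp only [mySplit, hcb, Bool.false_eq_true, if_false, List.mem_cons]
      have hlen : (withHead [c] (mySplit rest)).length = (mySplit rest).length := by
        cases h : mySplit rest with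
        | nil => exact absurd h (mySplit_ne_nil rest)
        | cons g gs => simp [withHead]
      rw [hlen, ih]
      constructor
      · exact Or.inr
      · rintro (h | h)
        · exact absurd h.symm hc
        · exact h

lemma isIn_space_eq (l : List Char) :
    PySem.Chars.isIn [' '] l = decide (' ' ∈ l) := by
  cases h : decide (' ' ∈ l) with
  | true =>
    have hm : ' ' ∈ l := of_decide_eq_true h
    obtain ⟨pre, suf, hps⟩ := List.append_of_mem hm
    exact (PySem.Chars.isIn_iff_infix _ _).mpr ⟨pre, suf, by simpa using hps.symm⟩
  | false =>
    have hm : ' ' ∉ l := of_decide_eq_false h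
    cases hin : PySem.Chars.isIn [' '] l with
    | false => rfl
    | true =>
      obtain ⟨pre, suf, hps⟩ := (PySem.Chars.isIn_iff_infix _ _).mp hin
      exact absurd (by rw [← hps]; simp : ' ' ∈ l) hm

-- ===== VERDICT (by name: the statement is the Claim_ definition above) =====
theorem processDiameter_spec : Claim_equal_processDiameter := by
  intro state _ _
  unfold Spec_processDiameter processDiameter processDiameter_alt
  simp only []
  set d := PySem.Dict.mk state with hd
  set m := d.getD "model" "" with hm
  by_cases h1 : d.getD "diameter" "" = ""
  · by_cases h2 : ' ' ∈ m.toList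
    · have hg2 : decide (1 < (pvSplit m).length) = true := by
        rw [pvSplit_eq]; simpa using (length_mySplit_gt_one_iff m.toList).mpr h2
      have hgC : PySem.Chars.isIn [' '] m.toList = true := by
        rw [isIn_space_eq]; simpa using h2
      have hg2' : PySem.Str.isIn " " m = true := by simpa using hgC
      simp only [h1, beq_self_eq_true, hg2, hg2', Bool.and_self, if_true]
      rw [scan_eq m.toList [] 0 rfl]
      simp only [List.reverse_nil, withHead_nil_mySplit, pvSplit_eq]
      have hnum : (mySplit m.toList).map pvDigitSum
          = (mySplit m.toList).map (fun g => (dcount g : Int)) := by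
        apply List.map_congr_left; intro g _; exact pvDigitSum_eq_dcount g
      rw [hnum, firstDia2_eq_index, contains_two_eq]
      cases hidx : PySem.List.index? ((mySplit m.toList).map (fun g => (dcount g : Int))) 2 with
      | none => simp
      | some i =>
        simp only [Option.isSome_some, if_true, PySem.List.pyGet?_natCast]
    · have hg2 : decide (1 < (pvSplit m).length) = false := by
        rw [pvSplit_eq]
        simpa using fun h => h2 ((length_mySplit_gt_one_iff m.toList).mp h)
      have hgC : PySem.Chars.isIn [' '] m.toList = false := by
        rw [isIn_space_eq]; simpa using h2
      simp [hg2, hgC]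
  · have : (d.getD "diameter" "" == "") = false := by simp [h1]
    simp [this]
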